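-- pv_equiv track=rewrite | github.com/mhso/IntFar | api/award_qualifiers.py | get_intfar_candidates
-- ===== SOURCE A (Python) =====
-- def get_intfar_candidates(intfar_details):
--     max_intfar_count = 1
--     intfar_counts = {}
--     max_count_intfar = None
--     qualifier_data = {}
--
--     # Look through details for the people qualifying for Int-Far.
--     # The one with most criteria met gets chosen.
--     for (index, (tied_intfars, stat_value)) in enumerate(intfar_details):
--         if tied_intfars is not None:
--             for intfar_disc_id in tied_intfars:
--                 current_intfar_count = intfar_counts.get(intfar_disc_id, 0) + 1
--                 intfar_counts[intfar_disc_id] = current_intfar_count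
--
--                 if current_intfar_count >= max_intfar_count:
--                     max_intfar_count = current_intfar_count
--                     max_count_intfar = intfar_disc_id
--
--                 data_list = qualifier_data.get(intfar_disc_id, [])
--                 data_list.append((index, stat_value))
--                 qualifier_data[intfar_disc_id] = data_list
--
--     return qualifier_data, max_count_intfar, max_intfar_count
-- ===== SOURCE B (Python) =====
-- def get_intfar_candidates(intfar_details):
--     # Pass 1: group (index, stat_value) by id; counts are the group sizes.
--     qualifier_data = {}
--     for index, (tied_intfars, stat_value) in enumerate(intfar_details):
--         for intfar_disc_id in (tied_intfars or ()):
--             qualifier_data.setdefault(intfar_disc_id, []).append((index, stat_value))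
--
--     if not qualifier_data:
--         return qualifier_data, None, 1
--
--     max_intfar_count = max(len(entries) for entries in qualifier_data.values())
--
--     # Pass 2: the winner is the last id (in flattened order) whose running
--     # count attains the global maximum.
--     max_count_intfar = None
--     running = {}
--     for tied_intfars, _stat_value in intfar_details:
--         for intfar_disc_id in (tied_intfars or ()):
--             current = running.get(intfar_disc_id, 0) + 1
--             running[intfar_disc_id] = current
--             if current == max_intfar_count:
--                 max_count_intfar = intfar_disc_id
--
--     return qualifier_data, max_count_intfar, max_intfar_count
-- ===== Notes on version B (the rewrite author's own statement) =====
-- stated objective: alternative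
-- what changed: Replaces A's single pass with an online running maximum and >=-tie-break winner by a decomposition: one grouping pass building qualifier_data, the maximum taken globally as the largest group size, and a second pass that assigns the winner to the last id whose running count attains that global maximum.
import Mathlib
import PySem

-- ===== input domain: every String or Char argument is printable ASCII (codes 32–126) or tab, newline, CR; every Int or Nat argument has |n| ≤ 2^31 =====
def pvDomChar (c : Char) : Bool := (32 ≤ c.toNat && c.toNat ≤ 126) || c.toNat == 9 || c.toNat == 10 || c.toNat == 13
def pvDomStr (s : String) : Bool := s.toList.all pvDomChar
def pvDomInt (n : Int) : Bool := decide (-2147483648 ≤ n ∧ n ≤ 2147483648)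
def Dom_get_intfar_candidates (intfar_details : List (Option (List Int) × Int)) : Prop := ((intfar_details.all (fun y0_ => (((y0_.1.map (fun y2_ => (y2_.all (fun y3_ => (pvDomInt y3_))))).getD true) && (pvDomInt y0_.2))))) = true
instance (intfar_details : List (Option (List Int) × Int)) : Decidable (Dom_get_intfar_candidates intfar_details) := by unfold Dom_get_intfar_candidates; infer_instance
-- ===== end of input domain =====

-- B replaces A's single pass with an online running maximum by a grouping pass, a global
-- maximum of the group sizes, and a second argmax pass (last id to attain the maximum);
-- objective: alternative decomposition, same asymptotic cost.

-- ===== PORT A =====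
def get_intfar_candidates (intfar_details : List (Option (List Int) × Int)) :
    (List (Int × List (Int × Int))) × Option Int × Int :=
  -- state: (max_intfar_count, intfar_counts, max_count_intfar, qualifier_data)
  let s := (PySem.List.enumerate intfar_details).foldl
    (fun (s : Int × PySem.Dict Int Int × Option Int × PySem.Dict Int (List (Int × Int))) p =>
      match p.2.1 with
      | none => s
      | some tied_intfars =>
        tied_intfars.foldl (fun s intfar_disc_id =>
          let current_intfar_count := s.2.1.getD intfar_disc_id 0 + 1
          let intfar_counts := s.2.1.insert intfar_disc_id current_intfar_count
          let mw : Int × Option Int :=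
            if s.1 ≤ current_intfar_count then (current_intfar_count, some intfar_disc_id)
            else (s.1, s.2.2.1)
          let data_list := s.2.2.2.getD intfar_disc_id []
          (mw.1, intfar_counts, mw.2,
           s.2.2.2.insert intfar_disc_id (data_list ++ [(p.1, p.2.2)]))) s)
    (1, PySem.Dict.empty, none, PySem.Dict.empty)
  (s.2.2.2.items, s.2.2.1, s.1)

-- ===== PORT B =====
def get_intfar_candidates_alt (intfar_details : List (Option (List Int) × Int)) :
    (List (Int × List (Int × Int))) × Option Int × Int :=
  -- pass 1: group (index, stat_value) by id ('setdefault(id, []).append(x)' ≡ insert id (getD id [] ++ [x]))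
  let qualifier_data := (PySem.List.enumerate intfar_details).foldl
    (fun (q : PySem.Dict Int (List (Int × Int))) p =>
      (p.2.1.getD []).foldl (fun q intfar_disc_id =>
        q.insert intfar_disc_id (q.getD intfar_disc_id [] ++ [(p.1, p.2.2)])) q)
    PySem.Dict.empty
  if qualifier_data.items = [] then (qualifier_data.items, none, 1)
  else
    let max_intfar_count :=
      (PySem.List.max? (qualifier_data.values.map (fun entries => (entries.length : Int)))
        (fun x => x)).getD 1   -- the guard above makes max? return some; max(nonempty)
    -- pass 2: last id whose running count attains the maximum
    let s := intfar_details.foldl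
      (fun (s : PySem.Dict Int Int × Option Int) p =>
        (p.1.getD []).foldl (fun s intfar_disc_id =>
          let current := s.1.getD intfar_disc_id 0 + 1
          (s.1.insert intfar_disc_id current,
           if current = max_intfar_count then some intfar_disc_id else s.2)) s)
      (PySem.Dict.empty, none)
    (qualifier_data.items, s.2, max_intfar_count)

-- ===== PRECONDITION & SPEC =====
def Spec_get_intfar_candidates (intfar_details : List (Option (List Int) × Int)) (out : (List (Int × List (Int × Int))) × Option Int × Int) : Prop := out = get_intfar_candidates_alt intfar_details
instance (intfar_details : List (Option (List Int) × Int)) (out : (List (Int × List (Int × Int))) × Option Int × Int) : Decidable (Spec_get_intfar_candidates intfar_details out) := by unfold Spec_get_intfar_candidates; infer_instance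

-- ===== CLAIM (what is proved, stated in full; the proofs are below) =====
def Claim_equal_get_intfar_candidates : Prop := ∀ (intfar_details : List (Option (List Int) × Int)), Dom_get_intfar_candidates intfar_details → Spec_get_intfar_candidates intfar_details (get_intfar_candidates intfar_details)

-- ===== LEMMAS AND PROOFS =====

-- The flattened event stream: one (index, id, stat_value) triple per inner iteration.
def pvEvs (l : List (Option (List Int) × Int)) : List (Int × Int × Int) :=
  (PySem.List.enumerate l).flatMap (fun p => (p.2.1.getD []).map (fun id => (p.1, id, p.2.2)))

-- A's counts/max/winner machine over a stream of ids; state (counts, max, winner).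
def pvAmw (ids : List Int) (s : PySem.Dict Int Int × Int × Option Int) :
    PySem.Dict Int Int × Int × Option Int :=
  ids.foldl (fun s id =>
    let c := s.1.getD id 0 + 1
    (s.1.insert id c, if s.2.1 ≤ c then (c, some id) else s.2)) s

-- B's pass-2 machine over a stream of ids; state (running, winner).
def pvBw (M : Int) (ids : List Int) (s : PySem.Dict Int Int × Option Int) :
    PySem.Dict Int Int × Option Int :=
  ids.foldl (fun s id =>
    let c := s.1.getD id 0 + 1
    (s.1.insert id c, if c = M then some id else s.2)) s

-- the grouping fold over events
def pvQf (es : List (Int × Int × Int)) (q : PySem.Dict Int (List (Int × Int))) :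
    PySem.Dict Int (List (Int × Int)) :=
  es.foldl (fun q e => q.insert e.2.1 (q.getD e.2.1 [] ++ [(e.1, e.2.2)])) q

theorem pvAmw_append (xs ys : List Int) (s) :
    pvAmw (xs ++ ys) s = pvAmw ys (pvAmw xs s) := List.foldl_append ..

theorem pvBw_append (M : Int) (xs ys : List Int) (s) :
    pvBw M (xs ++ ys) s = pvBw M ys (pvBw M xs s) := List.foldl_append ..

theorem pvQf_append (xs ys : List (Int × Int × Int)) (q) :
    pvQf (xs ++ ys) q = pvQf ys (pvQf xs q) := List.foldl_append ..

-- A's inner loop over one tied list, decomposed into the two machines.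
theorem pvA_inner (tied : List Int) (idx stat : Int)
    (s : Int × PySem.Dict Int Int × Option Int × PySem.Dict Int (List (Int × Int))) :
    tied.foldl (fun s intfar_disc_id =>
      let current_intfar_count := s.2.1.getD intfar_disc_id 0 + 1
      let intfar_counts := s.2.1.insert intfar_disc_id current_intfar_count
      let mw : Int × Option Int :=
        if s.1 ≤ current_intfar_count then (current_intfar_count, some intfar_disc_id)
        else (s.1, s.2.2.1)
      let data_list := s.2.2.2.getD intfar_disc_id []
      (mw.1, intfar_counts, mw.2,
       s.2.2.2.insert intfar_disc_id (data_list ++ [(idx, stat)]))) s =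
    ((pvAmw tied (s.2.1, s.1, s.2.2.1)).2.1, (pvAmw tied (s.2.1, s.1, s.2.2.1)).1,
     (pvAmw tied (s.2.1, s.1, s.2.2.1)).2.2,
     pvQf (tied.map (fun id => (idx, id, stat))) s.2.2.2) := by
  induction tied generalizing s with
  | nil => simp [pvAmw, pvQf]
  | cons a t ih =>
      simp only [List.foldl_cons, List.map_cons, pvAmw, pvQf] at *
      rw [ih]

-- A's whole loop = the machines on the flattened events.
theorem pvA_outer (L : List (Int × Option (List Int) × Int))
    (s : Int × PySem.Dict Int Int × Option Int × PySem.Dict Int (List (Int × Int))) :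
    L.foldl (fun s p =>
      match p.2.1 with
      | none => s
      | some tied_intfars =>
        tied_intfars.foldl (fun s intfar_disc_id =>
          let current_intfar_count := s.2.1.getD intfar_disc_id 0 + 1
          let intfar_counts := s.2.1.insert intfar_disc_id current_intfar_count
          let mw : Int × Option Int :=
            if s.1 ≤ current_intfar_count then (current_intfar_count, some intfar_disc_id)
            else (s.1, s.2.2.1)
          let data_list := s.2.2.2.getD intfar_disc_id []
          (mw.1, intfar_counts, mw.2,
           s.2.2.2.insert intfar_disc_id (data_list ++ [(p.1, p.2.2)]))) s) s =
    (let es := L.flatMap (fun p => (p.2.1.getD []).map (fun id => (p.1, id, p.2.2)))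
     let r := pvAmw (es.map (·.2.1)) (s.2.1, s.1, s.2.2.1)
     (r.2.1, r.1, r.2.2, pvQf es s.2.2.2)) := by
  induction L generalizing s with
  | nil => simp [pvAmw, pvQf]
  | cons p L ih =>
      simp only [List.foldl_cons, List.flatMap_cons, List.map_append]
      rw [ih, pvAmw_append, pvQf_append]
      cases hp : p.2.1 with
      | none => simp [pvAmw, pvQf]
      | some tied =>
          simp only [Option.getD_some]
          rw [pvA_inner]
          simp [List.map_map, Function.comp_def]

-- B's pass-1 loop = pvQf on the flattened events.
theorem pvB_qual (L : List (Int × Option (List Int) × Int))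
    (q : PySem.Dict Int (List (Int × Int))) :
    L.foldl (fun q p =>
      (p.2.1.getD []).foldl (fun q intfar_disc_id =>
        q.insert intfar_disc_id (q.getD intfar_disc_id [] ++ [(p.1, p.2.2)])) q) q =
    pvQf (L.flatMap (fun p => (p.2.1.getD []).map (fun id => (p.1, id, p.2.2)))) q := by
  induction L generalizing q with
  | nil => simp [pvQf]
  | cons p L ih =>
      simp only [List.foldl_cons, List.flatMap_cons]
      rw [ih, pvQf_append]
      congr 1
      simp [pvQf, List.foldl_map]

-- B's pass-2 loop = pvBw on the flattened ids.
theorem pvB_pass2 (M : Int) (L : List (Option (List Int) × Int))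
    (s : PySem.Dict Int Int × Option Int) :
    L.foldl (fun s p =>
      (p.1.getD []).foldl (fun s intfar_disc_id =>
        let current := s.1.getD intfar_disc_id 0 + 1
        (s.1.insert intfar_disc_id current,
         if current = M then some intfar_disc_id else s.2)) s) s =
    pvBw M (L.flatMap (fun p => p.1.getD [])) s := by
  induction L generalizing s with
  | nil => simp [pvBw]
  | cons p L ih =>
      simp only [List.foldl_cons, List.flatMap_cons]
      rw [ih, pvBw_append]
      rfl

-- the id stream of the events is the plain flattening of the tied lists
theorem pvIds_evs (l : List (Option (List Int) × Int)) :
    (pvEvs l).map (·.2.1) = l.flatMap (fun p => p.1.getD []) := by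
  unfold pvEvs
  rw [List.map_flatMap]
  conv_rhs => rw [← PySem.List.map_snd_enumerate l 0, List.flatMap_map]
  simp [List.map_map, Function.comp_def]

-- MASTER LEMMA: given M = the eventual maximum, A's online max/winner machine and
-- B's pass-2 machine compute the same counts and winner, and A's max ends at M.
theorem pvMaster (ids : List Int) (c : PySem.Dict Int Int) (m : Int) (w w2 : Option Int)
    (M : Int)
    (hub : ∀ id, c.getD id 0 ≤ m) (hmM : m ≤ M)
    (htot : ∀ id, c.getD id 0 + (ids.count id : Int) ≤ M)
    (hreach : m = M ∨ ∃ id, c.getD id 0 + (ids.count id : Int) = M)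
    (hw : m = M → w = w2) :
    pvAmw ids (c, m, w) = ((pvBw M ids (c, w2)).1, M, (pvBw M ids (c, w2)).2) := by
  induction ids generalizing c m w w2 with
  | nil =>
      have hm : m = M := by
        rcases hreach with h | ⟨id, hid⟩
        · exact h
        · have h1 := hub id
          simp at hid
          omega
      simp [pvAmw, pvBw, hm, hw hm]
  | cons a t ih =>
      simp only [pvAmw, pvBw, List.foldl_cons] at ih ⊢
      have hcnt := htot a
      rw [List.count_cons_self] at hcnt
      push_cast at hcnt
      -- facts about the updated counts dict, shared by all cases
      have htot' : ∀ id, ((c.insert a (c.getD a 0 + 1)).getD id 0 + (t.count id : Int)) ≤ M := by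
        intro id
        have h2 := htot id
        rw [PySem.Dict.getD_insert]
        split_ifs with h
        · subst h
          rw [List.count_cons_self] at h2
          push_cast at h2 ⊢
          omega
        · rwa [List.count_cons_of_ne (fun hc => h hc.symm)] at h2
      have hreach' : ∀ m₁ : Int, (m = M → m₁ = M) →
          m₁ = M ∨ ∃ id, ((c.insert a (c.getD a 0 + 1)).getD id 0 + (t.count id : Int)) = M := by
        intro m₁ hm₁
        rcases hreach with h | ⟨id, hid⟩
        · exact Or.inl (hm₁ h)
        · by_cases hia : id = a
          · subst hia
            rw [List.count_cons_self] at hid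
            push_cast at hid
            refine Or.inr ⟨id, ?_⟩
            rw [PySem.Dict.getD_insert_self]
            omega
          · refine Or.inr ⟨id, ?_⟩
            rw [List.count_cons_of_ne (fun hc => hia hc.symm)] at hid
            rw [PySem.Dict.getD_insert, if_neg hia]
            exact hid
      by_cases hA : m ≤ c.getD a 0 + 1
      · rw [if_pos hA]
        have hub' : ∀ id, (c.insert a (c.getD a 0 + 1)).getD id 0 ≤ c.getD a 0 + 1 := by
          intro id
          rw [PySem.Dict.getD_insert]
          split_ifs with h
          · omega
          · have := hub id; omega
        have hmM' : c.getD a 0 + 1 ≤ M := by omega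
        by_cases hB : c.getD a 0 + 1 = M
        · rw [if_pos hB]
          exact ih _ _ _ _ hub' hmM' htot' (Or.inl hB) (fun _ => rfl)
        · rw [if_neg hB]
          exact ih _ _ _ _ hub' hmM' htot'
            (hreach' (c.getD a 0 + 1) (fun h => by omega)) (fun h => absurd h hB)
      · rw [if_neg hA]
        have hB : ¬(c.getD a 0 + 1 = M) := by have := hub a; omega
        rw [if_neg hB]
        have hub' : ∀ id, (c.insert a (c.getD a 0 + 1)).getD id 0 ≤ m := by
          intro id
          rw [PySem.Dict.getD_insert]
          split_ifs with h
          · omega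
          · exact hub id
        exact ih _ _ _ _ hub' hmM htot' (hreach' m (fun h => h)) hw

-- length of each group = multiplicity of its id in the id stream
theorem pvQf_getD_len (es : List (Int × Int × Int)) (k : Int) :
    ((pvQf es PySem.Dict.empty).getD k []).length = (es.map (·.2.1)).count k := by
  have hstep : pvQf es PySem.Dict.empty =
      (es.map (fun e => (e.2.1, (e.1, e.2.2)))).foldl
        (fun d p => d.modify p.1 [] (· ++ [p.2])) PySem.Dict.empty := by
    rw [List.foldl_map]; rfl
  rw [hstep, PySem.Dict.getD_foldl_modify_append]
  simp only [PySem.Dict.getD_empty, List.nil_append, List.length_map]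
  rw [← List.countP_eq_length_filter, List.countP_map,
      List.count_eq_countP, List.countP_map]
  rfl

theorem pvQf_keys (es : List (Int × Int × Int)) :
    (pvQf es PySem.Dict.empty).keys = PySem.Set.ofList (es.map (·.2.1)) := by
  unfold pvQf
  rw [PySem.Dict.keys_foldl_insert_key]
  simp [PySem.Set.update, PySem.Set.ofList_eq_foldl]

theorem pvQf_nodup (es : List (Int × Int × Int)) :
    (pvQf es PySem.Dict.empty).keys.Nodup :=
  PySem.Dict.nodup_keys_foldl_insert_key es (·.2.1) _ _ PySem.Dict.nodup_keys_empty

-- ===== VERDICT (by name: the statement is the Claim_ definition above) =====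
theorem get_intfar_candidates_spec : Claim_equal_get_intfar_candidates := by
  intro l _
  unfold Spec_get_intfar_candidates get_intfar_candidates get_intfar_candidates_alt
  rw [pvA_outer, pvB_qual]
  simp only [pvB_pass2]
  rw [show (PySem.List.enumerate l).flatMap
        (fun p => (p.2.1.getD []).map fun id => (p.1, id, p.2.2)) = pvEvs l from rfl]
  set es := pvEvs l with hes
  set ids := es.map (·.2.1) with hids
  have hids' : l.flatMap (fun p => p.1.getD []) = ids := (pvIds_evs l).symm
  rw [hids']
  set Q := pvQf es PySem.Dict.empty with hQ
  by_cases hempty : Q.items = []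
  · -- no intfars at all: ids = [], both return (items, none, 1)
    have hkeys : Q.keys = [] := by simp [PySem.Dict.keys, hempty]
    have hids0 : ids = [] := by
      have h1 : PySem.Set.ofList ids = [] := by rw [← pvQf_keys es, ← hQ, hkeys]
      cases hids2 : ids with
      | nil => rfl
      | cons a t =>
          exfalso
          have : a ∈ PySem.Set.ofList ids := by simp [PySem.Set.mem_ofList, hids2]
          simp [h1] at this
    simp [hempty, hids0, pvAmw]
  · -- at least one intfar: feed the master lemma
    simp only [hempty, ite_false]
    set vals := Q.values.map (fun entries => (entries.length : Int)) with hvals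
    have hvals' : vals = (PySem.Set.ofList ids).map (fun k => ((ids.count k : Int))) := by
      rw [hvals, PySem.Dict.values_eq_map_keys Q (pvQf_nodup es) []]
      rw [show Q.keys = PySem.Set.ofList ids from pvQf_keys es]
      rw [List.map_map]
      refine List.map_congr_left (fun k _ => ?_)
      simp only [Function.comp_apply]
      rw [hQ]
      exact congrArg _ (pvQf_getD_len es k)
    have hvalsne : vals ≠ [] := by
      rw [hvals]
      simp only [ne_eq, List.map_eq_nil_iff, PySem.Dict.values, List.map_eq_nil_iff]
      exact fun h => hempty h
    obtain ⟨mx, hmx⟩ : ∃ mx, PySem.List.max? vals (fun x => x) = some mx := by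
      cases h : PySem.List.max? vals (fun x => x) with
      | none => exact absurd ((PySem.List.max?_eq_none_iff vals (fun x => x)).mp h) hvalsne
      | some mx => exact ⟨mx, rfl⟩
    rw [hmx]
    simp only [Option.getD_some]
    have hmem : mx ∈ vals := PySem.List.max?_mem hmx
    have hmax : ∀ y ∈ vals, y ≤ mx := PySem.List.max?_isMax hmx
    obtain ⟨k0, hk0mem, hk0⟩ : ∃ k0, k0 ∈ ids ∧ (ids.count k0 : Int) = mx := by
      rw [hvals'] at hmem
      obtain ⟨k0, hk0s, hk0⟩ := List.mem_map.mp hmem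
      exact ⟨k0, (PySem.Set.mem_ofList ids k0).mp hk0s, hk0⟩
    have h1le : 1 ≤ mx := by
      have : 1 ≤ ids.count k0 := List.one_le_count_iff.mpr hk0mem
      omega
    have hcountle : ∀ id : Int, (ids.count id : Int) ≤ mx := by
      intro id
      by_cases hid : id ∈ ids
      · exact hmax _ (by rw [hvals']; exact List.mem_map_of_mem ((PySem.Set.mem_ofList ids id).mpr hid))
      · rw [List.count_eq_zero_of_not_mem hid]; omega
    have := pvMaster ids PySem.Dict.empty 1 none none mx
      (fun id => by simp) h1le
      (fun id => by simpa using hcountle id)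
      (Or.inr ⟨k0, by simpa using hk0⟩)
      (fun _ => rfl)
    rw [this]
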